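-- pv_equiv track=rewrite | github.com/Cnd-North/adsb-flight-tracker | backfill_countries.py | get_country_from_registration
-- ===== SOURCE A (Python) =====
-- REGISTRATION_COUNTRY_PREFIXES = {
--     'C-': 'Canada',
--     'N': 'United States',
--     'G-': 'United Kingdom',
--     'D-': 'Germany',
--     'F-': 'France',
--     'I-': 'Italy',
--     'JA': 'Japan',
--     'HL': 'South Korea',
--     'B-': 'China',
--     'VH-': 'Australia',
--     'ZK-': 'New Zealand',
--     'XA-': 'Mexico',
--     'XB-': 'Mexico',
--     'XC-': 'Mexico',
--     'CC-': 'Chile',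
--     'PT-': 'Brazil',
--     'PR-': 'Brazil',
--     'PP-': 'Brazil',
--     'PH-': 'Netherlands',
--     'OO-': 'Belgium',
--     'LN-': 'Norway',
--     'SE-': 'Sweden',
--     'OH-': 'Finland',
--     'EI-': 'Ireland',
--     'HB-': 'Switzerland',
--     'TC-': 'Turkey',
--     'A6-': 'United Arab Emirates',
--     'A7-': 'Qatar',
--     'HZ-': 'Saudi Arabia',
--     'VT-': 'India',
--     '9M-': 'Malaysia',
--     'HS-': 'Thailand',
--     'RP-': 'Philippines',
--     'YV-': 'Venezuela',
--     'LV-': 'Argentina',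
--     'ZS-': 'South Africa',
-- }
--
-- def get_country_from_registration(registration):
--     """Determine country from aircraft registration prefix"""
--     if not registration:
--         return None
--
--     registration = registration.upper().strip()
--
--     # Check each prefix (sorted by length, longest first to match more specific prefixes)
--     for prefix, country in sorted(REGISTRATION_COUNTRY_PREFIXES.items(), key=lambda x: -len(x[0])):
--         if registration.startswith(prefix):
--             return country
--
--     return None
-- ===== SOURCE B (Python) =====
-- # Longest-prefix match via a first-character dispatch table: each bucket holds the
-- # remaining characters of its prefixes (longest first), so only a handful of tiny
-- # suffix checks run per call instead of sorting and scanning the whole table.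
-- _BY_FIRST = {
--     'C': [('C-', 'Chile'), ('-', 'Canada')],
--     'N': [('', 'United States')],
--     'G': [('-', 'United Kingdom')],
--     'D': [('-', 'Germany')],
--     'F': [('-', 'France')],
--     'I': [('-', 'Italy')],
--     'J': [('A', 'Japan')],
--     'H': [('B-', 'Switzerland'), ('Z-', 'Saudi Arabia'), ('S-', 'Thailand'), ('L', 'South Korea')],
--     'B': [('-', 'China')],
--     'V': [('H-', 'Australia'), ('T-', 'India')],
--     'Z': [('K-', 'New Zealand'), ('S-', 'South Africa')],
--     'X': [('A-', 'Mexico'), ('B-', 'Mexico'), ('C-', 'Mexico')],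
--     'P': [('T-', 'Brazil'), ('R-', 'Brazil'), ('P-', 'Brazil'), ('H-', 'Netherlands')],
--     'O': [('O-', 'Belgium'), ('H-', 'Finland')],
--     'L': [('N-', 'Norway'), ('V-', 'Argentina')],
--     'S': [('E-', 'Sweden')],
--     'E': [('I-', 'Ireland')],
--     'T': [('C-', 'Turkey')],
--     'A': [('6-', 'United Arab Emirates'), ('7-', 'Qatar')],
--     '9': [('M-', 'Malaysia')],
--     'R': [('P-', 'Philippines')],
--     'Y': [('V-', 'Venezuela')],
-- }
--
--
-- def get_country_from_registration(registration):
--     """Determine country from aircraft registration prefix"""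
--     if not registration:
--         return None
--
--     r = registration.upper().strip()
--     if not r:
--         return None
--
--     tail = r[1:]
--     for rest, country in _BY_FIRST.get(r[0], []):
--         if tail.startswith(rest):
--             return country
--     return None
-- ===== Notes on version B (the rewrite author's own statement) =====
-- stated objective: alternative
-- what changed: Replaces A's per-call sort of the whole prefix table plus a linear startswith scan with a first-character dispatch table whose small buckets store only the remaining prefix characters, longest first.
import Mathlib
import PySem

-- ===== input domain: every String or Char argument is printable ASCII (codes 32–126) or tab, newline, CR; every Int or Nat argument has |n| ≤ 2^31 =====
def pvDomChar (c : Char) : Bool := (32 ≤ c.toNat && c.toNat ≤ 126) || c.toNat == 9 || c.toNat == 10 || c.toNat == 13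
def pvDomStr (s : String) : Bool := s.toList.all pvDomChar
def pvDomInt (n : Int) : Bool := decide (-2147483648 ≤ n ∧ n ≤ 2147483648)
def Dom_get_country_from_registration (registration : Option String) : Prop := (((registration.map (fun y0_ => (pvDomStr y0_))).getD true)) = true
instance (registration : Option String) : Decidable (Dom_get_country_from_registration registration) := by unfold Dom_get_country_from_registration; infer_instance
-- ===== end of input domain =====

-- B replaces A's per-call sort of the whole prefix table and linear startswith scan by a
-- first-character dispatch table whose small buckets hold the remaining prefix characters.

-- ===== PORT A =====
def REGISTRATION_COUNTRY_PREFIXES : PySem.Dict String String := PySem.Dict.ofList [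
  ("C-", "Canada"), ("N", "United States"), ("G-", "United Kingdom"), ("D-", "Germany"),
  ("F-", "France"), ("I-", "Italy"), ("JA", "Japan"), ("HL", "South Korea"), ("B-", "China"),
  ("VH-", "Australia"), ("ZK-", "New Zealand"), ("XA-", "Mexico"), ("XB-", "Mexico"),
  ("XC-", "Mexico"), ("CC-", "Chile"), ("PT-", "Brazil"), ("PR-", "Brazil"), ("PP-", "Brazil"),
  ("PH-", "Netherlands"), ("OO-", "Belgium"), ("LN-", "Norway"), ("SE-", "Sweden"),
  ("OH-", "Finland"), ("EI-", "Ireland"), ("HB-", "Switzerland"), ("TC-", "Turkey"),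
  ("A6-", "United Arab Emirates"), ("A7-", "Qatar"), ("HZ-", "Saudi Arabia"), ("VT-", "India"),
  ("9M-", "Malaysia"), ("HS-", "Thailand"), ("RP-", "Philippines"), ("YV-", "Venezuela"),
  ("LV-", "Argentina"), ("ZS-", "South Africa")]

-- the 'for prefix, country in sorted(...)' loop of A
def pvLoopA (pairs : List (String × String)) (reg : String) : Option String :=
  match pairs with
  | [] => none
  | (pfx, country) :: rest =>
    if PySem.Str.startswith reg pfx then some country else pvLoopA rest reg

def get_country_from_registration (registration : Option String) : Option String :=
  match registration with
  | none => none
  | some r =>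
    if r = "" then none
    else
      let r := PySem.Str.strip (PySem.Str.upper r)
      pvLoopA (PySem.List.sorted REGISTRATION_COUNTRY_PREFIXES.items
                 (fun x => -(PySem.Str.len x.1)) false) r

-- ===== PORT B =====
-- _BY_FIRST: bucket per leading character; entries are (rest-of-prefix, country), longest first
def PV_BY_FIRST : PySem.Dict Char (List (String × String)) := PySem.Dict.ofList [
  ('C', [("C-", "Chile"), ("-", "Canada")]),
  ('N', [("", "United States")]),
  ('G', [("-", "United Kingdom")]),
  ('D', [("-", "Germany")]),
  ('F', [("-", "France")]),
  ('I', [("-", "Italy")]),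
  ('J', [("A", "Japan")]),
  ('H', [("B-", "Switzerland"), ("Z-", "Saudi Arabia"), ("S-", "Thailand"), ("L", "South Korea")]),
  ('B', [("-", "China")]),
  ('V', [("H-", "Australia"), ("T-", "India")]),
  ('Z', [("K-", "New Zealand"), ("S-", "South Africa")]),
  ('X', [("A-", "Mexico"), ("B-", "Mexico"), ("C-", "Mexico")]),
  ('P', [("T-", "Brazil"), ("R-", "Brazil"), ("P-", "Brazil"), ("H-", "Netherlands")]),
  ('O', [("O-", "Belgium"), ("H-", "Finland")]),
  ('L', [("N-", "Norway"), ("V-", "Argentina")]),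
  ('S', [("E-", "Sweden")]),
  ('E', [("I-", "Ireland")]),
  ('T', [("C-", "Turkey")]),
  ('A', [("6-", "United Arab Emirates"), ("7-", "Qatar")]),
  ('9', [("M-", "Malaysia")]),
  ('R', [("P-", "Philippines")]),
  ('Y', [("V-", "Venezuela")])]

-- the 'for rest, country in _BY_FIRST.get(r[0], [])' loop of B
def pvScanB (tail : String) (entries : List (String × String)) : Option String :=
  match entries with
  | [] => none
  | (rest, country) :: es =>
    if PySem.Str.startswith tail rest then some country else pvScanB tail es

def get_country_from_registration_alt (registration : Option String) : Option String :=
  match registration with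
  | none => none
  | some r =>
    if r = "" then none
    else
      let r := PySem.Str.strip (PySem.Str.upper r)
      if r = "" then none
      else
        pvScanB (PySem.Str.slice r (some 1) none)
          (((PySem.Str.pyGet? r 0).bind (fun c => PySem.Dict.get? PV_BY_FIRST c)).getD [])

-- ===== PRECONDITION & SPEC =====
def Spec_get_country_from_registration (registration : Option String) (out : Option String) : Prop := out = get_country_from_registration_alt registration
instance (registration : Option String) (out : Option String) : Decidable (Spec_get_country_from_registration registration out) := by unfold Spec_get_country_from_registration; infer_instance

-- ===== CLAIM (what is proved, stated in full; the proofs are below) =====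
def Claim_equal_get_country_from_registration : Prop := ∀ (registration : Option String), Dom_get_country_from_registration registration → Spec_get_country_from_registration registration (get_country_from_registration registration)

-- ===== LEMMAS AND PROOFS =====
set_option maxRecDepth 100000 in
set_option maxHeartbeats 1000000 in
theorem pvCore (reg : String) :
    pvLoopA (PySem.List.sorted REGISTRATION_COUNTRY_PREFIXES.items
               (fun x => -(PySem.Str.len x.1)) false) reg
      = (if reg = "" then none
         else pvScanB (PySem.Str.slice reg (some 1) none)
           (((PySem.Str.pyGet? reg 0).bind (fun c => PySem.Dict.get? PV_BY_FIRST c)).getD [])) := by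
  have hs : PySem.List.sorted REGISTRATION_COUNTRY_PREFIXES.items
               (fun x => -(PySem.Str.len x.1)) false
      = [("VH-", "Australia"), ("ZK-", "New Zealand"), ("XA-", "Mexico"), ("XB-", "Mexico"),
         ("XC-", "Mexico"), ("CC-", "Chile"), ("PT-", "Brazil"), ("PR-", "Brazil"),
         ("PP-", "Brazil"), ("PH-", "Netherlands"), ("OO-", "Belgium"), ("LN-", "Norway"),
         ("SE-", "Sweden"), ("OH-", "Finland"), ("EI-", "Ireland"), ("HB-", "Switzerland"),
         ("TC-", "Turkey"), ("A6-", "United Arab Emirates"), ("A7-", "Qatar"),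
         ("HZ-", "Saudi Arabia"), ("VT-", "India"), ("9M-", "Malaysia"), ("HS-", "Thailand"),
         ("RP-", "Philippines"), ("YV-", "Venezuela"), ("LV-", "Argentina"),
         ("ZS-", "South Africa"), ("C-", "Canada"), ("G-", "United Kingdom"), ("D-", "Germany"),
         ("F-", "France"), ("I-", "Italy"), ("JA", "Japan"), ("HL", "South Korea"),
         ("B-", "China"), ("N", "United States")] := by rfl
  have hD : PV_BY_FIRST = PySem.Dict.mk [
    ('C', [("C-", "Chile"), ("-", "Canada")]), ('N', [("", "United States")]),
    ('G', [("-", "United Kingdom")]), ('D', [("-", "Germany")]), ('F', [("-", "France")]),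
    ('I', [("-", "Italy")]), ('J', [("A", "Japan")]),
    ('H', [("B-", "Switzerland"), ("Z-", "Saudi Arabia"), ("S-", "Thailand"), ("L", "South Korea")]),
    ('B', [("-", "China")]), ('V', [("H-", "Australia"), ("T-", "India")]),
    ('Z', [("K-", "New Zealand"), ("S-", "South Africa")]),
    ('X', [("A-", "Mexico"), ("B-", "Mexico"), ("C-", "Mexico")]),
    ('P', [("T-", "Brazil"), ("R-", "Brazil"), ("P-", "Brazil"), ("H-", "Netherlands")]),
    ('O', [("O-", "Belgium"), ("H-", "Finland")]), ('L', [("N-", "Norway"), ("V-", "Argentina")]),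
    ('S', [("E-", "Sweden")]), ('E', [("I-", "Ireland")]), ('T', [("C-", "Turkey")]),
    ('A', [("6-", "United Arab Emirates"), ("7-", "Qatar")]), ('9', [("M-", "Malaysia")]),
    ('R', [("P-", "Philippines")]), ('Y', [("V-", "Venezuela")])] := rfl
  have hnil : ∀ x : Char,
      (PySem.Dict.mk ([] : List (Char × List (String × String)))).get? x = none := fun _ => rfl
  obtain ⟨l, rfl⟩ : ∃ l, reg = String.ofList l := ⟨reg.toList, String.ofList_toList.symm⟩
  rw [hs]
  cases l with
  | nil => decide
  | cons a t =>
    rw [if_neg (by simp [String.ext_iff])]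
    simp only [pvLoopA, hD, PySem.Str.startswith, PySem.Chars.startswith,
      PySem.Str.slice, PySem.Chars.slice_eq_listSlice, PySem.List.slice_from_one,
      PySem.Str.pyGet?, PySem.Chars.pyGet?, String.toList_ofList,
      PySem.List.pyGet?_zero_cons, PySem.Dict.get?_mk_cons, Option.bind_some]
    by_cases hC : a = 'C'
    · subst hC
      simp [pvScanB, PySem.Str.startswith, PySem.Chars.startswith, List.isPrefixOf, String.toList_ofList]
    by_cases hN : a = 'N'
    · subst hN
      simp [pvScanB, PySem.Str.startswith, PySem.Chars.startswith, List.isPrefixOf, String.toList_ofList]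
    by_cases hG : a = 'G'
    · subst hG
      simp [pvScanB, PySem.Str.startswith, PySem.Chars.startswith, List.isPrefixOf, String.toList_ofList]
    by_cases hD : a = 'D'
    · subst hD
      simp [pvScanB, PySem.Str.startswith, PySem.Chars.startswith, List.isPrefixOf, String.toList_ofList]
    by_cases hF : a = 'F'
    · subst hF
      simp [pvScanB, PySem.Str.startswith, PySem.Chars.startswith, List.isPrefixOf, String.toList_ofList]
    by_cases hI : a = 'I'
    · subst hI
      simp [pvScanB, PySem.Str.startswith, PySem.Chars.startswith, List.isPrefixOf, String.toList_ofList]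
    by_cases hJ : a = 'J'
    · subst hJ
      simp [pvScanB, PySem.Str.startswith, PySem.Chars.startswith, List.isPrefixOf, String.toList_ofList]
    by_cases hH : a = 'H'
    · subst hH
      simp [pvScanB, PySem.Str.startswith, PySem.Chars.startswith, List.isPrefixOf, String.toList_ofList]
    by_cases hB : a = 'B'
    · subst hB
      simp [pvScanB, PySem.Str.startswith, PySem.Chars.startswith, List.isPrefixOf, String.toList_ofList]
    by_cases hV : a = 'V'
    · subst hV
      simp [pvScanB, PySem.Str.startswith, PySem.Chars.startswith, List.isPrefixOf, String.toList_ofList]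
    by_cases hZ : a = 'Z'
    · subst hZ
      simp [pvScanB, PySem.Str.startswith, PySem.Chars.startswith, List.isPrefixOf, String.toList_ofList]
    by_cases hX : a = 'X'
    · subst hX
      simp [pvScanB, PySem.Str.startswith, PySem.Chars.startswith, List.isPrefixOf, String.toList_ofList]
    by_cases hP : a = 'P'
    · subst hP
      simp [pvScanB, PySem.Str.startswith, PySem.Chars.startswith, List.isPrefixOf, String.toList_ofList]
    by_cases hO : a = 'O'
    · subst hO
      simp [pvScanB, PySem.Str.startswith, PySem.Chars.startswith, List.isPrefixOf, String.toList_ofList]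
    by_cases hL : a = 'L'
    · subst hL
      simp [pvScanB, PySem.Str.startswith, PySem.Chars.startswith, List.isPrefixOf, String.toList_ofList]
    by_cases hS : a = 'S'
    · subst hS
      simp [pvScanB, PySem.Str.startswith, PySem.Chars.startswith, List.isPrefixOf, String.toList_ofList]
    by_cases hE : a = 'E'
    · subst hE
      simp [pvScanB, PySem.Str.startswith, PySem.Chars.startswith, List.isPrefixOf, String.toList_ofList]
    by_cases hT : a = 'T'
    · subst hT
      simp [pvScanB, PySem.Str.startswith, PySem.Chars.startswith, List.isPrefixOf, String.toList_ofList]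
    by_cases hA : a = 'A'
    · subst hA
      simp [pvScanB, PySem.Str.startswith, PySem.Chars.startswith, List.isPrefixOf, String.toList_ofList]
    by_cases h9 : a = '9'
    · subst h9
      simp [pvScanB, PySem.Str.startswith, PySem.Chars.startswith, List.isPrefixOf, String.toList_ofList]
    by_cases hR : a = 'R'
    · subst hR
      simp [pvScanB, PySem.Str.startswith, PySem.Chars.startswith, List.isPrefixOf, String.toList_ofList]
    by_cases hY : a = 'Y'
    · subst hY
      simp [pvScanB, PySem.Str.startswith, PySem.Chars.startswith, List.isPrefixOf, String.toList_ofList]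
    simp [pvScanB, hnil, List.isPrefixOf, Ne.symm hC, Ne.symm hN, Ne.symm hG, Ne.symm hD, Ne.symm hF, Ne.symm hI, Ne.symm hJ, Ne.symm hH, Ne.symm hB, Ne.symm hV, Ne.symm hZ, Ne.symm hX, Ne.symm hP, Ne.symm hO, Ne.symm hL, Ne.symm hS, Ne.symm hE, Ne.symm hT, Ne.symm hA, Ne.symm h9, Ne.symm hR, Ne.symm hY]


-- ===== VERDICT (by name: the statement is the Claim_ definition above) =====
theorem get_country_from_registration_spec : Claim_equal_get_country_from_registration := by
  intro registration _
  unfold Spec_get_country_from_registration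
  match registration with
  | none => rfl
  | some r =>
    show get_country_from_registration (some r) = get_country_from_registration_alt (some r)
    show (if r = "" then none
          else pvLoopA (PySem.List.sorted REGISTRATION_COUNTRY_PREFIXES.items
                 (fun x => -(PySem.Str.len x.1)) false) (PySem.Str.strip (PySem.Str.upper r)))
        = (if r = "" then none
          else if PySem.Str.strip (PySem.Str.upper r) = "" then none
          else pvScanB (PySem.Str.slice (PySem.Str.strip (PySem.Str.upper r)) (some 1) none)
            (((PySem.Str.pyGet? (PySem.Str.strip (PySem.Str.upper r)) 0).bind (fun c => PySem.Dict.get? PV_BY_FIRST c)).getD []))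
    by_cases h : r = ""
    · simp [h]
    · rw [if_neg h, if_neg h]
      exact pvCore _
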